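-- pv_equiv track=rewrite | github.com/KeyboardMaestro/AlgorithmPython | source/Triangle.py | solution
-- ===== SOURCE A (Python) =====
-- def solution(sides):
--     possible = []
--     edge = max(sides)
--     for side in range(edge-1,edge):
--         possible.append(side)
--
--     for side in range(edge+1, sum(sides)):
--         possible.append(side)
--     return len(possible)
-- ===== SOURCE B (Python) =====
-- def solution(sides):
--     s = sum(sides)
--     m = max(sides)
--     return 1 + max(0, s - m - 1)
-- ===== Notes on version B (the rewrite author's own statement) =====
-- stated objective: simpler
-- what changed: Replaces the two range loops that build a list with the closed-form count 1 + max(0, sum(sides)-max(sides)-1).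
import Mathlib
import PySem

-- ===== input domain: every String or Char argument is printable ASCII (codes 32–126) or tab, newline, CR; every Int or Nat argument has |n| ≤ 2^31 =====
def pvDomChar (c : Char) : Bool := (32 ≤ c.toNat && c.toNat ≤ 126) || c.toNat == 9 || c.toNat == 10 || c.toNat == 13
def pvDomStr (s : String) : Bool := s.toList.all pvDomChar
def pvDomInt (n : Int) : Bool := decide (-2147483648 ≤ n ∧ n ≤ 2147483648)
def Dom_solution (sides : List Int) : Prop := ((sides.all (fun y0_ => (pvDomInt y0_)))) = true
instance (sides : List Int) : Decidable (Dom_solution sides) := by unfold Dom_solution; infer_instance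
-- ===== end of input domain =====

-- B replaces A's two range-building loops with the closed form 1 + max(0, sum - max - 1); Pre_ excludes the empty list, on which A raises ValueError (max of empty sequence).


-- ===== PORT A =====
def solution (sides : List Int) : Int :=
  match PySem.List.max? sides (fun y => y) with
  | none => 0   -- unreachable: Python raises ValueError here; excluded by Pre_solution
  | some edge =>
    let possible : List Int := []
    let possible := (PySem.List.pyRange (edge - 1) edge 1).foldl
      (fun acc side => acc ++ [side]) possible
    let possible := (PySem.List.pyRange (edge + 1) (sides.sum) 1).foldl
      (fun acc side => acc ++ [side]) possible
    (possible.length : Int)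

-- ===== PORT B =====
def solution_alt (sides : List Int) : Int :=
  match PySem.List.max? sides (fun y => y) with
  | none => 0   -- unreachable under Pre_solution
  | some m => 1 + max 0 (sides.sum - m - 1)

-- ===== PRECONDITION & SPEC =====
-- Pre_ excludes only the empty list, on which Python's max(sides) raises ValueError.
def Pre_solution (sides : List Int) : Prop := sides ≠ []
instance (sides : List Int) : Decidable (Pre_solution sides) := by unfold Pre_solution; infer_instance
def pvWitness_solution : List Int := [3, 4, 5]

def Spec_solution (sides : List Int) (out : Int) : Prop := out = solution_alt sides
instance (sides : List Int) (out : Int) : Decidable (Spec_solution sides out) := by unfold Spec_solution; infer_instance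

-- ===== CLAIM (what is proved, stated in full; the proofs are below) =====
def Claim_equal_solution : Prop := ∀ (sides : List Int), Dom_solution sides → Pre_solution sides → Spec_solution sides (solution sides)

-- ===== LEMMAS AND PROOFS =====
-- appending each range element to an accumulator is just list append
theorem foldl_append_singleton (xs acc : List Int) :
    xs.foldl (fun a s => a ++ [s]) acc = acc ++ xs := by
  induction xs generalizing acc with
  | nil => simp
  | cons x t ih => simp [List.foldl, ih, List.append_assoc]

-- ===== VERDICT (by name: the statement is the Claim_ definition above) =====
theorem solution_spec : Claim_equal_solution := by
  intro sides _ hpre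
  unfold Spec_solution solution solution_alt
  cases hmax : PySem.List.max? sides (fun y => y) with
  | none => rfl
  | some m =>
    simp only [foldl_append_singleton, List.nil_append, List.length_append]
    have h1 : (PySem.List.pyRange (m - 1) m 1).length = 1 := by
      rw [PySem.List.length_pyRange_one]; omega
    rw [h1, PySem.List.length_pyRange_one]
    omega
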